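-- pv_equiv track=rewrite | github.com/cdavidbm/phonoscriptum_v1 | color.py | generar_color_hexadecimal
-- ===== SOURCE A (Python) =====
-- def generar_color_hexadecimal(frase):
--     """Generar un color hexadecimal único para cada palabra"""
--     palabras = frase.lower().split()
--     colores = []
--     for palabra in palabras:
--         r = sum(ord(char) * (i + 1) for i, char in enumerate(palabra)) % 256
--         g = sum(ord(char) * (i + 2) for i, char in enumerate(palabra)) % 256
--         b = sum(ord(char) * (i + 3) for i, char in enumerate(palabra)) % 256
--         color_hex = "#{:02x}{:02x}{:02x}".format(r, g, b)
--         colores.append(color_hex)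
--     return colores
-- ===== SOURCE B (Python) =====
-- def _color_de_palabra(palabra):
--     S = 0
--     base = 0
--     for i, ch in enumerate(palabra):
--         o = ord(ch)
--         S += o
--         base += o * (i + 1)
--     return "#{:02x}{:02x}{:02x}".format(base % 256, (base + S) % 256, (base + 2 * S) % 256)
--
--
-- def generar_color_hexadecimal(frase):
--     """Generar un color hexadecimal único para cada palabra"""
--     return [_color_de_palabra(palabra) for palabra in frase.lower().split()]
-- ===== Notes on version B (the rewrite author's own statement) =====
-- stated objective: alternative
-- what changed: One pass per word accumulating S = sum(ord) and base = sum(ord*(i+1)); the g and b channels are derived algebraically as (base+S)%256 and (base+2S)%256 instead of rescanning the word with two more weighted sums.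
import Mathlib
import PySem

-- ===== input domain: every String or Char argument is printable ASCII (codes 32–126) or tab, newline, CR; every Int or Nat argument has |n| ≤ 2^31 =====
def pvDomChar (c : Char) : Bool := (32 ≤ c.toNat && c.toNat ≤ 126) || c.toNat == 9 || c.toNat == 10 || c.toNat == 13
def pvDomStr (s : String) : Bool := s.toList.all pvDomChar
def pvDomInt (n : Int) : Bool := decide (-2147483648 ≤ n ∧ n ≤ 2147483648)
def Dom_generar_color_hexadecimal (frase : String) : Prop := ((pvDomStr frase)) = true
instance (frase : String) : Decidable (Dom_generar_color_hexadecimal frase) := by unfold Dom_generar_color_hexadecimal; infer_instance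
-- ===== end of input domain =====

-- B replaces A's three weighted scans per word by one scan accumulating S = Σ ord and
-- base = Σ ord*(i+1), deriving g and b as (base+S)%256 and (base+2S)%256 (alternative decomposition).

-- shared formatting helper: "{:02x}".format(n), exact for 0 ≤ n < 256 (the only values formatted here)
def pvHexDigit (k : Nat) : Char := if k < 10 then Char.ofNat (48 + k) else Char.ofNat (87 + k)
def pvFmt02x (n : Int) : String := String.mk [pvHexDigit (n.toNat / 16), pvHexDigit (n.toNat % 16)]
-- "#{:02x}{:02x}{:02x}".format(r, g, b)
def pvColorHex (r g b : Int) : String := String.mk ('#' :: (pvFmt02x r).toList ++ (pvFmt02x g).toList ++ (pvFmt02x b).toList)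

-- ===== PORT A =====
def generar_color_hexadecimal (frase : String) : List String :=
  let palabras := PySem.Str.split₀ (PySem.Str.lower frase)
  palabras.foldl (fun colores palabra =>
    let r := PySem.Int.mod (((PySem.List.enumerate palabra.toList 0).map
                (fun p => (p.2.toNat : Int) * (p.1 + 1))).sum) 256
    let g := PySem.Int.mod (((PySem.List.enumerate palabra.toList 0).map
                (fun p => (p.2.toNat : Int) * (p.1 + 2))).sum) 256
    let b := PySem.Int.mod (((PySem.List.enumerate palabra.toList 0).map
                (fun p => (p.2.toNat : Int) * (p.1 + 3))).sum) 256
    colores ++ [pvColorHex r g b]) []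

-- ===== PORT B =====
-- B's inner loop: one pass over the word keeping (i, S, base)
def pvSums : List Char → Int → Int → Int → Int × Int
  | [], _, S, base => (S, base)
  | c :: cs, i, S, base => pvSums cs (i + 1) (S + (c.toNat : Int)) (base + (c.toNat : Int) * (i + 1))

def pvColorDePalabra (palabra : String) : String :=
  let sb := pvSums palabra.toList 0 0 0
  pvColorHex (PySem.Int.mod sb.2 256) (PySem.Int.mod (sb.2 + sb.1) 256)
    (PySem.Int.mod (sb.2 + 2 * sb.1) 256)

def generar_color_hexadecimal_alt (frase : String) : List String :=
  (PySem.Str.split₀ (PySem.Str.lower frase)).map pvColorDePalabra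

-- ===== PRECONDITION & SPEC =====
def Spec_generar_color_hexadecimal (frase : String) (out : List String) : Prop := out = generar_color_hexadecimal_alt frase
instance (frase : String) (out : List String) : Decidable (Spec_generar_color_hexadecimal frase out) := by unfold Spec_generar_color_hexadecimal; infer_instance

-- ===== CLAIM (what is proved, stated in full; the proofs are below) =====
def Claim_equal_generar_color_hexadecimal : Prop := ∀ (frase : String), Dom_generar_color_hexadecimal frase → Spec_generar_color_hexadecimal frase (generar_color_hexadecimal frase)

-- ===== LEMMAS AND PROOFS =====

-- shift the channel weight k back to weight 1 plus (k-1)·S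
theorem pv_sum_shift (cs : List Char) (s k : Int) :
    ((PySem.List.enumerate cs s).map (fun p => (p.2.toNat : Int) * (p.1 + k))).sum =
      ((PySem.List.enumerate cs s).map (fun p => (p.2.toNat : Int) * (p.1 + 1))).sum +
        (k - 1) * (cs.map (fun c => (c.toNat : Int))).sum := by
  induction cs generalizing s with
  | nil => simp [PySem.List.enumerate_nil]
  | cons c cs ih =>
      simp only [PySem.List.enumerate_cons, List.map_cons, List.sum_cons, ih (s + 1)]
      ring

-- B's single-pass accumulator equals (S + Σ ord, base + Σ ord·(i+1))
theorem pv_sums_spec (cs : List Char) (s S base : Int) :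
    pvSums cs s S base =
      (S + (cs.map (fun c => (c.toNat : Int))).sum,
       base + ((PySem.List.enumerate cs s).map (fun p => (p.2.toNat : Int) * (p.1 + 1))).sum) := by
  induction cs generalizing s S base with
  | nil => simp [pvSums, PySem.List.enumerate_nil]
  | cons c cs ih =>
      simp only [pvSums, ih, PySem.List.enumerate_cons, List.map_cons, List.sum_cons]
      simp only [Prod.mk.injEq]
      constructor <;> ring

-- A's accumulating foldl builds exactly the map
theorem pv_foldl_append_map {α β : Type} (f : α → β) (xs : List α) (acc : List β) :
    xs.foldl (fun colores x => colores ++ [f x]) acc = acc ++ xs.map f := by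
  induction xs generalizing acc with
  | nil => simp
  | cons x xs ih => simp [List.foldl_cons, ih]

theorem pv_word_eq (palabra : String) :
    pvColorHex
      (PySem.Int.mod (((PySem.List.enumerate palabra.toList 0).map
          (fun p => (p.2.toNat : Int) * (p.1 + 1))).sum) 256)
      (PySem.Int.mod (((PySem.List.enumerate palabra.toList 0).map
          (fun p => (p.2.toNat : Int) * (p.1 + 2))).sum) 256)
      (PySem.Int.mod (((PySem.List.enumerate palabra.toList 0).map
          (fun p => (p.2.toNat : Int) * (p.1 + 3))).sum) 256) = pvColorDePalabra palabra := by
  unfold pvColorDePalabra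
  rw [pv_sums_spec]
  rw [pv_sum_shift palabra.toList 0 2, pv_sum_shift palabra.toList 0 3]
  norm_num

-- ===== VERDICT (by name: the statement is the Claim_ definition above) =====
theorem generar_color_hexadecimal_spec : Claim_equal_generar_color_hexadecimal := by
  intro frase _
  unfold Spec_generar_color_hexadecimal generar_color_hexadecimal generar_color_hexadecimal_alt
  simp only [pv_foldl_append_map, List.nil_append]
  exact List.map_congr_left (fun palabra _ => pv_word_eq palabra)
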